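-- pv_equiv track=rewrite | github.com/soander/NEU-CS5001-2021Fall | Module5/which_day.py | which_day
-- ===== SOURCE A (Python) =====
-- def which_day(number):
--     """
--     Function: A function to return the weekday according to number
--     :param number: An integer 1 and 7 to represent weekday
--     :return: The weekday corresponding number
--     """
--     # Make a list about weekday
--     weekday = ["Sunday", "Monday", "Tuesday", "Wednesday",
--                "Thursday", "Friday", "Saturday"]
--     # Make a list about number
--     integer = ["1", "2", "3", "4", "5", "6", "7"]
--     # Set index for while loop
--     index = 0
--     # Use while loop to return weekday
--     while index < len(integer):
--         if number == int(integer[index]):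
--             return weekday[index]
--         index += 1
-- ===== SOURCE B (Python) =====
-- def which_day(number):
--     """Recursive countdown: peel one day name per decrement of number; no table lookup."""
--     def go(n, days):
--         if not days:
--             return None
--         if n == 1:
--             return days[0]
--         return go(n - 1, days[1:])
--     if number < 1:
--         return None
--     return go(number, ["Sunday", "Monday", "Tuesday", "Wednesday",
--                        "Thursday", "Friday", "Saturday"])
-- ===== Notes on version B (the rewrite author's own statement) =====
-- stated objective: alternative
-- what changed: Replaces A's while-loop that scans a parallel list of digit strings, parsing each with int() and comparing against number, by a structural recursion that decrements the argument while peeling the list of names, with a single guard for non-positive input.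
import Mathlib
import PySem

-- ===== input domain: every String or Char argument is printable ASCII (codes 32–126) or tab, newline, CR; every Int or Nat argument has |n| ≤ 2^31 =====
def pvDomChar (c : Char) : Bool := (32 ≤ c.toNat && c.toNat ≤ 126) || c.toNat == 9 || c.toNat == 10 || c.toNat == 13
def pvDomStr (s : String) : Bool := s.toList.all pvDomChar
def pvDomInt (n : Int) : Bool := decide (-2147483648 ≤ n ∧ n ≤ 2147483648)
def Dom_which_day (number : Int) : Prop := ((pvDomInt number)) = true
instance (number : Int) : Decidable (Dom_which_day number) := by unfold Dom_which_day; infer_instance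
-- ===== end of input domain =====

-- B replaces A's scan-and-compare over parsed digit strings by a recursive countdown that
-- peels one name per decrement; same values everywhere (alternative decomposition).

-- ===== PORT A =====
def pyWeekday : List String := ["Sunday", "Monday", "Tuesday", "Wednesday",
    "Thursday", "Friday", "Saturday"]
def pyInteger : List String := ["1", "2", "3", "4", "5", "6", "7"]

-- A's while loop: walks the two lists in parallel, parses integer[index] with int(),
-- returns weekday[index] on a match, falls through to None.
def whichDayLoop (number : Int) : List (String × String) → Option String
  | [] => none
  | (s, w) :: rest =>
    match PySem.Int.ofStr? s with
    | some v => if number = v then some w else whichDayLoop number rest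
    | none => none    -- unreachable: every entry of pyInteger parses

def which_day (number : Int) : Option String :=
  whichDayLoop number (pyInteger.zip pyWeekday)

-- ===== PORT B =====
-- Source B's inner `go`: counts n down to 1 while peeling the list of names.
def goDays (n : Int) : List String → Option String
  | [] => none
  | d :: rest => if n = 1 then some d else goDays (n - 1) rest

def which_day_alt (number : Int) : Option String :=
  if number < 1 then none
  else goDays number ["Sunday", "Monday", "Tuesday", "Wednesday",
    "Thursday", "Friday", "Saturday"]

-- ===== PRECONDITION & SPEC =====
def Spec_which_day (number : Int) (out : Option String) : Prop := out = which_day_alt number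
instance (number : Int) (out : Option String) : Decidable (Spec_which_day number out) := by unfold Spec_which_day; infer_instance

-- ===== CLAIM (what is proved, stated in full; the proofs are below) =====
def Claim_equal_which_day : Prop := ∀ (number : Int), Dom_which_day number → Spec_which_day number (which_day number)

-- ===== LEMMAS AND PROOFS =====
lemma which_day_eq (number : Int) : which_day number = which_day_alt number := by
  by_cases h : 1 ≤ number ∧ number ≤ 7
  · obtain ⟨h1, h7⟩ := h
    interval_cases number <;> decide
  · have hne : ∀ k : Int, 1 ≤ k → k ≤ 7 → number ≠ k := by
      intro k hk1 hk7 he; exact h ⟨he ▸ hk1, he ▸ hk7⟩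
    have hA : which_day number = none := by
      unfold which_day
      simp only [pyInteger, pyWeekday, List.zip, List.zipWith, whichDayLoop]
      have o1 : PySem.Int.ofStr? "1" = some 1 := by decide
      have o2 : PySem.Int.ofStr? "2" = some 2 := by decide
      have o3 : PySem.Int.ofStr? "3" = some 3 := by decide
      have o4 : PySem.Int.ofStr? "4" = some 4 := by decide
      have o5 : PySem.Int.ofStr? "5" = some 5 := by decide
      have o6 : PySem.Int.ofStr? "6" = some 6 := by decide
      have o7 : PySem.Int.ofStr? "7" = some 7 := by decide
      rw [o1, o2, o3, o4, o5, o6, o7]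
      simp [if_neg (hne 1 (by norm_num) (by norm_num)), if_neg (hne 2 (by norm_num) (by norm_num)),
        if_neg (hne 3 (by norm_num) (by norm_num)), if_neg (hne 4 (by norm_num) (by norm_num)),
        if_neg (hne 5 (by norm_num) (by norm_num)), if_neg (hne 6 (by norm_num) (by norm_num)),
        if_neg (hne 7 (by norm_num) (by norm_num))]
    rw [hA]
    unfold which_day_alt
    by_cases hlt : number < 1
    · simp [hlt]
    · have h8 : 8 ≤ number := by
        rcases not_and_or.mp h with h' | h'
        · omega
        · omega
      simp only [if_neg hlt, goDays]
      rw [if_neg (by omega : ¬ number = 1), if_neg (by omega : ¬ number - 1 = 1),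
        if_neg (by omega : ¬ number - 1 - 1 = 1), if_neg (by omega : ¬ number - 1 - 1 - 1 = 1),
        if_neg (by omega : ¬ number - 1 - 1 - 1 - 1 = 1),
        if_neg (by omega : ¬ number - 1 - 1 - 1 - 1 - 1 = 1),
        if_neg (by omega : ¬ number - 1 - 1 - 1 - 1 - 1 - 1 = 1)]

-- ===== VERDICT (by name: the statement is the Claim_ definition above) =====
theorem which_day_spec : Claim_equal_which_day := by
  intro number _
  exact which_day_eq number
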